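-- pv_equiv track=rewrite | github.com/ForrestHilton/manim-lamination-builder | manim_lamination_builder/deployment_sequences.py | get_fixed_points
-- ===== SOURCE A (Python) =====
-- def flatten_point(point: list):
--     fp = 0
--     l = len(point)
--     for j in range(l):
--         fp += point[l - j - 1] * (10**j)
--     return fp
--
-- def get_fixed_points(base, length):
--     fixedPoints = []
--     for i in range(base - 1):
--         fp = []
--         for j in range(length):
--             fp.append(i + 1)
--         fixedPoints.append(flatten_point(fp))
--     return fixedPoints
-- ===== SOURCE B (Python) =====
-- def get_fixed_points(base, length):
--     fixedPoints = []
--     for i in range(base - 1):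
--         d = i + 1
--         fp = 0
--         for _ in range(length):
--             fp = fp * 10 + d
--         fixedPoints.append(fp)
--     return fixedPoints
-- ===== Notes on version B (the rewrite author's own statement) =====
-- stated objective: simpler
-- what changed: Replaced the digit-list-building helper plus power-sum flatten_point with a single Horner accumulator fp = fp*10 + d per digit, removing the intermediate list and the repeated 10**j exponentiations.
import Mathlib
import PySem

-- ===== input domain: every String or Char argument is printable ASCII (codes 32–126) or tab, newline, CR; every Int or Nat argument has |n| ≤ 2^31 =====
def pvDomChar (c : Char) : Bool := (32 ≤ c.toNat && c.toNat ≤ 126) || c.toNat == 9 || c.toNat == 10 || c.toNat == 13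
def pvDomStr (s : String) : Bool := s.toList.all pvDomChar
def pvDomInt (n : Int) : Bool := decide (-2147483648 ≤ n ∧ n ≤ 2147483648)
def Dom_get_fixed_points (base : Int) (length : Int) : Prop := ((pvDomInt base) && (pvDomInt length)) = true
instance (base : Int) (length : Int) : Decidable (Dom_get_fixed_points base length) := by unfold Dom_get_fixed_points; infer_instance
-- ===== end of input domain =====

-- B replaces the digit-list + power-sum flatten_point of A with a single Horner
-- accumulator per digit (fp = fp*10 + d), a simpler decomposition with the same outputs.

-- ===== PORT A =====
-- fp += point[l - j - 1] * (10**j): the index is always in range, so pyGet? is some;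
-- .getD 0 only discharges the Option. 10**j with j ≥ 0 is ported as 10 ^ j.toNat (exact there).
def flatten_point (point : List Int) : Int :=
  let l : Int := point.length
  (PySem.List.pyRange 0 l 1).foldl
    (fun fp j => fp + (PySem.List.pyGet? point (l - j - 1)).getD 0 * 10 ^ j.toNat) 0

def get_fixed_points (base : Int) (length : Int) : List Int :=
  (PySem.List.pyRange 0 (base - 1) 1).foldl
    (fun fixedPoints i =>
      let fp : List Int :=
        (PySem.List.pyRange 0 length 1).foldl (fun fp _ => fp ++ [i + 1]) []
      fixedPoints ++ [flatten_point fp]) []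

-- ===== PORT B =====
def get_fixed_points_alt (base : Int) (length : Int) : List Int :=
  (PySem.List.pyRange 0 (base - 1) 1).foldl
    (fun fixedPoints i =>
      let d := i + 1
      fixedPoints ++ [(PySem.List.pyRange 0 length 1).foldl (fun fp _ => fp * 10 + d) 0]) []

-- ===== PRECONDITION & SPEC =====
def Spec_get_fixed_points (base : Int) (length : Int) (out : List Int) : Prop := out = get_fixed_points_alt base length
instance (base : Int) (length : Int) (out : List Int) : Decidable (Spec_get_fixed_points base length out) := by unfold Spec_get_fixed_points; infer_instance

-- ===== CLAIM (what is proved, stated in full; the proofs are below) =====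
def Claim_equal_get_fixed_points : Prop := ∀ (base : Int) (length : Int), Dom_get_fixed_points base length → Spec_get_fixed_points base length (get_fixed_points base length)

-- ===== LEMMAS AND PROOFS =====

-- repunit: rep n = 1 + 10 + … + 10^(n-1)
def pvRep : Nat → Int
  | 0 => 0
  | n + 1 => 10 ^ n + pvRep n

-- the inner list-building loop of A produces a replicate
theorem pv_build_replicate (l : List Int) (acc : List Int) (x : Int) :
    l.foldl (fun fp _ => fp ++ [x]) acc = acc ++ List.replicate l.length x := by
  induction l generalizing acc with
  | nil => simp
  | cons h t ih =>
    simp only [List.foldl, ih, List.length_cons]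
    simp [List.replicate_succ]

-- B's Horner loop over any index list of length n
theorem pv_horner_foldl (l : List Int) (acc d : Int) :
    l.foldl (fun fp _ => fp * 10 + d) acc = acc * 10 ^ l.length + d * pvRep l.length := by
  induction l generalizing acc with
  | nil => simp [pvRep]
  | cons h t ih =>
    simp only [List.foldl, ih, List.length_cons, pvRep]
    rw [pow_succ]
    ring

-- the power-sum fold evaluates to d * repunit
theorem pv_powersum (d : Int) (n : Nat) :
    (PySem.List.pyRange 0 (n : Int) 1).foldl (fun fp j => fp + d * 10 ^ j.toNat) 0
      = d * pvRep n := by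
  induction n with
  | zero => simp [PySem.List.pyRange_one_eq_nil, pvRep]
  | succ m ih =>
    have hsplit : PySem.List.pyRange 0 ((m : Int) + 1) 1
        = PySem.List.pyRange 0 (m : Int) 1 ++ [(m : Int)] := by
      exact PySem.List.pyRange_one_succ_right (by positivity)
    push_cast
    rw [hsplit, List.foldl_append, ih]
    simp [pvRep]
    ring

-- A's flatten_point on a repdigit list equals d * repunit
theorem pv_flatten_replicate (n : Nat) (d : Int) :
    flatten_point (List.replicate n d) = d * pvRep n := by
  unfold flatten_point
  simp only [List.length_replicate]
  have hcongr :
      (PySem.List.pyRange 0 (n : Int) 1).foldl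
        (fun fp j => fp + (PySem.List.pyGet? (List.replicate n d) ((n : Int) - j - 1)).getD 0 * 10 ^ j.toNat) 0
        = (PySem.List.pyRange 0 (n : Int) 1).foldl (fun fp j => fp + d * 10 ^ j.toNat) 0 := by
    apply PySem.List.foldl_congr_mem
    intro acc j hj
    rw [PySem.List.mem_pyRange_one] at hj
    have h1 : (0:Int) ≤ (n : Int) - j - 1 := by omega
    have h2 : (n : Int) - j - 1 < (List.replicate n d).length := by simp; omega
    rw [PySem.List.pyGet?_of_nonneg _ h1]
    rw [List.getElem?_replicate, if_pos (by omega : ((n : Int) - j - 1).toNat < n)]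
    simp
  rw [hcongr, pv_powersum]

-- pointwise equality of the two loop bodies' appended element
theorem pv_elem_eq (length i : Int) :
    flatten_point ((PySem.List.pyRange 0 length 1).foldl (fun fp _ => fp ++ [i + 1]) [])
      = (PySem.List.pyRange 0 length 1).foldl (fun fp _ => fp * 10 + (i + 1)) 0 := by
  rw [pv_build_replicate, pv_horner_foldl]
  simp only [List.nil_append]
  rw [pv_flatten_replicate]
  ring

-- ===== VERDICT (by name: the statement is the Claim_ definition above) =====
theorem get_fixed_points_spec : Claim_equal_get_fixed_points := by
  intro base length _
  unfold Spec_get_fixed_points get_fixed_points get_fixed_points_alt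
  apply PySem.List.foldl_congr_mem
  intro acc i _
  simp only [pv_elem_eq]
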